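-- pv_equiv track=rewrite | github.com/ikr/algo-practice | hackerrank/Crossword_Puzzle/solution.py | word_placings_from_line
-- ===== SOURCE A (Python) =====
-- def word_placings_from_line(line, origin_place, places_delta):
--     result = []
--     current = []
--     for i in range(len(line)):
--         if line[i] == '-':
--             dr, dc = map(lambda x: x * i, places_delta)
--             current.append((origin_place[0] + dr, origin_place[1] + dc))
--         else:
--             if len(current) > 1:
--                 result.append(tuple(current))
--             current = []
--     if len(current) > 1:
--         result.append(tuple(current))
--     return tuple(result)
-- ===== SOURCE B (Python) =====
-- def word_placings_from_line(line, origin_place, places_delta):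
--     # Two-pointer run scanner: find each maximal run of dashes, keep runs of
--     # length > 1, and map absolute indices to coordinates.
--     words = []
--     n = len(line)
--     i = 0
--     while i < n:
--         if line[i] == '-':
--             j = i + 1
--             while j < n and line[j] == '-':
--                 j += 1
--             if j - i > 1:
--                 words.append(tuple((origin_place[0] + places_delta[0] * k,
--                                     origin_place[1] + places_delta[1] * k)
--                                    for k in range(i, j)))
--             i = j
--         else:
--             i += 1
--     return tuple(words)
-- ===== Notes on version B (the rewrite author's own statement) =====
-- stated objective: alternative
-- what changed: Replaces A's stateful char-by-char accumulator (pending 'current' list flushed on non-dash and at end) with a two-pointer scanner that locates each maximal dash run [i,j) and maps range(i,j) to coordinates directly.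
import Mathlib
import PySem

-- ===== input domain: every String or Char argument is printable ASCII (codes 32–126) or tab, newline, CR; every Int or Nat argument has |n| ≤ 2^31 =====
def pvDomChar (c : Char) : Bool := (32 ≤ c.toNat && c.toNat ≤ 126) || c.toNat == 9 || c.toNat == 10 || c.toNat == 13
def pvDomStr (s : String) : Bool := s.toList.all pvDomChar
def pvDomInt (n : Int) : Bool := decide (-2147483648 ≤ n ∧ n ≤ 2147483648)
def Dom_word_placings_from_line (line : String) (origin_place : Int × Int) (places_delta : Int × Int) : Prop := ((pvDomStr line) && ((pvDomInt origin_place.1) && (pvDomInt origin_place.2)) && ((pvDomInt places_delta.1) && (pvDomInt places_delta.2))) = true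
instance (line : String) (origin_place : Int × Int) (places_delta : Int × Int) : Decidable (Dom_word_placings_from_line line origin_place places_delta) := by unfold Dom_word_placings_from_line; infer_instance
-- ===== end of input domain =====

-- B replaces A's stateful char-by-char accumulator by a two-pointer maximal-dash-run
-- scanner (alternative decomposition, same O(n) cost).

-- ===== PORT A =====
-- coordinate of blank cell at absolute index i (A computes this inline via map)
def pvCoord (origin_place places_delta : Int × Int) (i : Int) : Int × Int :=
  (origin_place.1 + places_delta.1 * i, origin_place.2 + places_delta.2 * i)

-- one iteration of A's for-loop: state = (result, current)
def pvAStep (origin_place places_delta : Int × Int)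
    (st : List (List (Int × Int)) × List (Int × Int)) (p : Int × Char) :
    List (List (Int × Int)) × List (Int × Int) :=
  if p.2 = '-' then (st.1, st.2 ++ [pvCoord origin_place places_delta p.1])
  else if 1 < st.2.length then (st.1 ++ [st.2], []) else (st.1, [])

-- 'for i in range(len(line)): line[i] …' ported as a fold over the (index, char)
-- enumeration of the string — exact, since every index of the range is in bounds.
def word_placings_from_line (line : String) (origin_place : Int × Int) (places_delta : Int × Int) : List (List (Int × Int)) :=
  let st := (PySem.List.enumerate line.toList 0).foldl (pvAStep origin_place places_delta) ([], [])
  if 1 < st.2.length then st.1 ++ [st.2] else st.1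

-- ===== PORT B =====
-- B's inner 'while j < n and line[j] == "-"': number of leading dashes
def pvDashCount : List Char → Nat
  | [] => 0
  | c :: rest => if c = '-' then pvDashCount rest + 1 else 0

-- B's outer while-loop: at a dash, take the whole maximal run [i, i+m), emit it
-- if m > 1, and resume after the run; otherwise advance one position.
def pvAltGo (origin_place places_delta : Int × Int) (cs : List Char) (i : Int) : List (List (Int × Int)) :=
  match cs with
  | [] => []
  | c :: rest =>
    if c = '-' then
      let m := pvDashCount rest + 1
      let word := (List.range m).map (fun (k : Nat) => pvCoord origin_place places_delta (i + (k : Int)))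
      let tl := pvAltGo origin_place places_delta (rest.drop (m - 1)) (i + m)
      if 1 < m then word :: tl else tl
    else pvAltGo origin_place places_delta rest (i + 1)
termination_by cs.length
decreasing_by
  all_goals simp [List.length_drop]

def word_placings_from_line_alt (line : String) (origin_place : Int × Int) (places_delta : Int × Int) : List (List (Int × Int)) :=
  pvAltGo origin_place places_delta line.toList 0

-- ===== PRECONDITION & SPEC =====
def Spec_word_placings_from_line (line : String) (origin_place : Int × Int) (places_delta : Int × Int) (out : List (List (Int × Int))) : Prop := out = word_placings_from_line_alt line origin_place places_delta
instance (line : String) (origin_place : Int × Int) (places_delta : Int × Int) (out : List (List (Int × Int))) : Decidable (Spec_word_placings_from_line line origin_place places_delta out) := by unfold Spec_word_placings_from_line; infer_instance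

-- ===== CLAIM (what is proved, stated in full; the proofs are below) =====
def Claim_equal_word_placings_from_line : Prop := ∀ (line : String) (origin_place : Int × Int) (places_delta : Int × Int), Dom_word_placings_from_line line origin_place places_delta → Spec_word_placings_from_line line origin_place places_delta (word_placings_from_line line origin_place places_delta)

-- ===== LEMMAS AND PROOFS =====

-- flush of A's pending 'current' list
def pvFlush (cur : List (Int × Int)) : List (List (Int × Int)) :=
  if 1 < cur.length then [cur] else []

-- characterisation of the rest of A's run, given pending accumulator 'cur'
def pvE (o d : Int × Int) (cur : List (Int × Int)) (cs : List Char) (i : Int) : List (List (Int × Int)) :=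
  match cs with
  | [] => pvFlush cur
  | c :: rest =>
    if c = '-' then pvE o d (cur ++ [pvCoord o d i]) rest (i + 1)
    else pvFlush cur ++ pvE o d [] rest (i + 1)

theorem pvAltGo_nil (o d : Int × Int) (i : Int) : pvAltGo o d [] i = [] := by
  rw [pvAltGo.eq_def]

theorem pvAltGo_cons (o d : Int × Int) (c : Char) (rest : List Char) (i : Int) :
    pvAltGo o d (c :: rest) i =
      if c = '-' then
        (let m := pvDashCount rest + 1
         let word := (List.range m).map (fun (k : Nat) => pvCoord o d (i + (k : Int)))
         let tl := pvAltGo o d (rest.drop (m - 1)) (i + m)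
         if 1 < m then word :: tl else tl)
      else pvAltGo o d rest (i + 1) := by
  rw [pvAltGo.eq_def]

theorem foldA_eq_pvE (o d : Int × Int) (cs : List Char) :
    ∀ (i : Int) (res : List (List (Int × Int))) (cur : List (Int × Int)),
    (let st := (PySem.List.enumerate cs i).foldl (pvAStep o d) (res, cur)
     if 1 < st.2.length then st.1 ++ [st.2] else st.1) = res ++ pvE o d cur cs i := by
  induction cs with
  | nil =>
    intro i res cur
    simp only [PySem.List.enumerate_nil, List.foldl_nil, pvE, pvFlush]
    split_ifs <;> simp
  | cons c rest ih =>
    intro i res cur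
    simp only [PySem.List.enumerate_cons, List.foldl_cons, pvE]
    by_cases hc : c = '-'
    · simp only [pvAStep, hc]
      exact ih (i + 1) res (cur ++ [pvCoord o d i])
    · simp only [pvAStep, hc, if_false]
      by_cases hl : 1 < cur.length
      · simp only [if_pos hl]
        rw [ih (i + 1) (res ++ [cur]) []]
        simp [pvFlush, hl]
      · simp only [if_neg hl]
        rw [ih (i + 1) res []]
        simp [pvFlush, hl]

theorem pvE_run (o d : Int × Int) (cs : List Char) :
    ∀ (i : Int) (acc : List (Int × Int)),
    pvE o d acc cs i =
      pvFlush (acc ++ (List.range (pvDashCount cs)).map (fun (k : Nat) => pvCoord o d (i + (k : Int))))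
        ++ pvE o d [] (cs.drop (pvDashCount cs)) (i + (pvDashCount cs : Int)) := by
  induction cs with
  | nil => intro i acc; simp [pvE, pvDashCount, pvFlush]
  | cons c rest ih =>
    intro i acc
    by_cases hc : c = '-'
    · subst hc
      have h1 : pvE o d acc ('-' :: rest) i = pvE o d (acc ++ [pvCoord o d i]) rest (i + 1) := by
        simp [pvE]
      have hm : pvDashCount ('-' :: rest) = pvDashCount rest + 1 := by simp [pvDashCount]
      rw [h1, ih (i + 1) (acc ++ [pvCoord o d i]), hm]
      have hrange : (List.range (pvDashCount rest + 1)).map (fun (k : Nat) => pvCoord o d (i + (k : Int)))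
          = pvCoord o d i :: (List.range (pvDashCount rest)).map (fun (k : Nat) => pvCoord o d ((i + 1) + (k : Int))) := by
        rw [List.range_succ_eq_map]
        simp only [List.map_cons, List.map_map, Nat.cast_zero, add_zero]
        exact congr_arg₂ List.cons rfl (List.map_congr_left fun k _ => by
          simp only [Function.comp_apply]
          congr 1
          push_cast
          ring)
      rw [hrange]
      have hidx : i + ((pvDashCount rest + 1 : Nat) : Int) = i + 1 + (pvDashCount rest : Int) := by
        push_cast; ring
      rw [hidx]
      simp only [List.drop_succ_cons]
      congr 1
      congr 1
      simp
    · have hm : pvDashCount (c :: rest) = 0 := by simp [pvDashCount, hc]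
      simp [pvE, hc, hm, pvFlush]

theorem pvE_eq_altGo (o d : Int × Int) :
    ∀ (n : Nat) (cs : List Char), cs.length ≤ n → ∀ i,
    pvE o d [] cs i = pvAltGo o d cs i := by
  intro n
  induction n with
  | zero =>
    intro cs hcs i
    have : cs = [] := List.length_eq_zero_iff.mp (Nat.le_zero.mp hcs)
    subst this; simp [pvE, pvFlush, pvAltGo_nil]
  | succ n ih =>
    intro cs hcs i
    match cs with
    | [] => simp [pvE, pvFlush, pvAltGo_nil]
    | c :: rest =>
      by_cases hc : c = '-'
      · subst hc
        rw [pvE_run o d ('-' :: rest) i []]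
        have hm : pvDashCount ('-' :: rest) = pvDashCount rest + 1 := by simp [pvDashCount]
        rw [pvAltGo_cons]
        have hdrop : ('-' :: rest).drop (pvDashCount rest + 1) = rest.drop (pvDashCount rest + 1 - 1) := by
          simp
        rw [hm, hdrop, ih (rest.drop (pvDashCount rest + 1 - 1)) (by simp at hcs ⊢; omega) _]
        simp only [if_true, pvFlush, List.nil_append, List.length_map, List.length_range]
        split_ifs with h
        · simp
        · simp
      · rw [pvAltGo_cons]
        simp only [if_neg hc]
        have h2 : pvE o d [] (c :: rest) i = pvE o d [] rest (i + 1) := by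
          simp [pvE, hc, pvFlush]
        rw [h2, ih rest (by simp at hcs; omega) (i + 1)]

-- ===== VERDICT (by name: the statement is the Claim_ definition above) =====
theorem word_placings_from_line_spec : Claim_equal_word_placings_from_line := by
  intro line o d _
  unfold Spec_word_placings_from_line word_placings_from_line word_placings_from_line_alt
  rw [foldA_eq_pvE o d line.toList 0 [] []]
  rw [pvE_eq_altGo o d line.toList.length line.toList (le_refl _) 0]
  simp
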